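-- pv_equiv track=rewrite | github.com/AyazNakhudaGitHub/SudokuSolver | SudokuSolver.py | solve
-- ===== SOURCE A (Python) =====
-- def solve(board):
--     find = findEmpty(board)
--     if not find:
--         return True  # No empty locations.
--
--     else:
--         row = find[0]
--         col = find[1]
--
--     for i in range(1, 10):
--         if check((row, col), i, board):
--             board[row][col] = i
--
--             if solve(board):  # recurse, the board with the new value added.
--                 return True
--
--             board[row][col] = 0  # reset the last element that was added.
--
--     return False  # no value 1-9 is valid for this position. Therfore we must back track.
--
-- def findEmpty(board):
--     for i in range(len(board)):
--
--         for j in range(len(board[0])):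
--
--             if board[i][j] == 0:
--                 return (i, j)  # Row and Column
--
--     return None
--
-- def check(position, num, board):
--     for i in range(len(board[0])):
--
--         if board[position[0]][i] == num and position[
--             1] != i:  # we do not want to check the position that we just inserted into.
--             return False
--         if board[i][position[1]] == num and position[0] != i:
--             return False
--
--     # coordinates for the sector
--     boxX = position[0] // 3  # 9 numbers in total and 3 suib catagories, that is why we // 3 is used.
--     boxY = position[1] // 3  # as integer divison will give a value of 0, 1 or 2.
--
--     a = boxX * 3  # Multiply by 3 to get the coordinates of the top left box of the sector.
--     b = boxY * 3
--
--     for j in range(b, b + 3):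
--
--         if board[a][j] == num and (a, j) != position:
--             return False
--
--         if board[a + 1][j] == num and (a + 1, j) != position:
--             return False
--
--         if board[a + 2][j] == num and (a + 2, j) != position:
--             return False
--
--     return True
-- ===== SOURCE B (Python) =====
-- def solve(board):
--     # Same backtracking search; collects all empty cells in one scan instead of
--     # re-scanning the board for the next empty cell at every node, then recurses
--     # over that list by index.  Mutates board in place exactly like the original.
--     empties = [(i, j) for i, row in enumerate(board) for j, x in enumerate(row) if x == 0]
--
--     def ok(r, c, num):
--         if any(board[r][i] == num for i in range(9) if i != c):
--             return False
--         if any(board[i][c] == num for i in range(9) if i != r):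
--             return False
--         a, b = r - r % 3, c - c % 3
--         return not any(board[i][j] == num
--                        for i in range(a, a + 3) for j in range(b, b + 3)
--                        if (i, j) != (r, c))
--
--     def go(k):
--         if k == len(empties):
--             return True
--         r, c = empties[k]
--         for v in range(1, 10):
--             if ok(r, c, v):
--                 board[r][c] = v
--                 if go(k + 1):
--                     return True
--                 board[r][c] = 0
--         return False
--
--     return go(0)
-- ===== Notes on version B (the rewrite author's own statement) =====
-- stated objective: alternative
-- what changed: B scans the board once (enumerate over actual rows) to build the list of empty cells and recurses over that list by index, instead of re-scanning the whole board for the next empty cell at every search node; the validity check is restructured as any()-comprehensions over row, column and box.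
-- outside the precondition, e.g. on solve([[1], [2, 0]]): A returns True, B raises IndexError
import Mathlib
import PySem

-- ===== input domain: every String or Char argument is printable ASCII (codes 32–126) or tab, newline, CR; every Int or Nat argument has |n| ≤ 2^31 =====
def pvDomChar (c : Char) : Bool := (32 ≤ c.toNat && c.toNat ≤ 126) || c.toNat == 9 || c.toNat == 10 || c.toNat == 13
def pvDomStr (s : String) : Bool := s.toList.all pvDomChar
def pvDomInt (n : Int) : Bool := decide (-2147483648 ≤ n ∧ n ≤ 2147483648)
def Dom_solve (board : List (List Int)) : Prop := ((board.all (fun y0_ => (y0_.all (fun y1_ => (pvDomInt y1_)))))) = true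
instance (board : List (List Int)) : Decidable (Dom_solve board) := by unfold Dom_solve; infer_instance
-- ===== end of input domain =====

-- B replaces A's per-node rescan for the next empty cell by a single upfront scan
-- building the list of empty cells, recursing over that list (objective: alternative).
-- Both Pythons mutate `board` in place identically; the equivalence proved here is
-- about the RETURN value.

-- ===== PORT A =====

-- board[r][c]: exact for indices in range (guaranteed by Pre_solve at every use).
def pvCell (b : List (List Int)) (r c : Int) : Int :=
  PySem.List.pyGetD (PySem.List.pyGetD b r []) c 0

-- board[r][c] = v: exact for indices in range (guaranteed by Pre_solve at every use).
def pvSet (b : List (List Int)) (r c : Int) (v : Int) : List (List Int) :=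
  PySem.List.pySetD b r (PySem.List.pySetD (PySem.List.pyGetD b r []) c v)

-- findEmpty's inner loop 'for j in range(len(board[0])): if board[i][j] == 0: return (i, j)'
def findEmptyInner (b : List (List Int)) (i : Int) : List Int → Option (Int × Int)
  | [] => none
  | j :: js => if pvCell b i j == 0 then some (i, j) else findEmptyInner b i js

-- findEmpty's outer loop 'for i in range(len(board))'
def findEmptyOuter (b : List (List Int)) (cols : List Int) : List Int → Option (Int × Int)
  | [] => none
  | i :: is =>
    match findEmptyInner b i cols with
    | some p => some p
    | none => findEmptyOuter b cols is

-- len(board[0]) is hoisted out of the loop: it is a constant of the loop, and for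
-- board = [] the loop body never runs so board[0] is never evaluated in Python either.
def findEmpty (b : List (List Int)) : Option (Int × Int) :=
  findEmptyOuter b
    (PySem.List.pyRange 0 (PySem.List.len (PySem.List.pyGetD b 0 [])) 1)
    (PySem.List.pyRange 0 (PySem.List.len b) 1)

-- check(position, num, board); the early-return-False loops are List.all.
def checkA (pos : Int × Int) (num : Int) (b : List (List Int)) : Bool :=
  ((PySem.List.pyRange 0 (PySem.List.len (PySem.List.pyGetD b 0 [])) 1).all (fun i =>
      !(pvCell b pos.1 i == num && pos.2 != i) &&
      !(pvCell b i pos.2 == num && pos.1 != i))) &&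
  (let boxX := PySem.Int.floordiv pos.1 3
   let boxY := PySem.Int.floordiv pos.2 3
   let a := boxX * 3
   let bb := boxY * 3
   (PySem.List.pyRange bb (bb + 3) 1).all (fun j =>
      !(pvCell b a j == num && ((a, j) != pos)) &&
      (!(pvCell b (a + 1) j == num && ((a + 1, j) != pos)) &&
       !(pvCell b (a + 2) j == num && ((a + 2, j) != pos)))))

-- solve's recursion; the board is threaded explicitly (Python mutates it in place).
-- The Nat fuel is only a totality artifact: under Pre_solve the board has at most 81
-- empty cells, so fuel 82 is never exhausted; the fuel-0 branch is dead code there.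
mutual
def solveTryA (fuel : Nat) (r c : Int) (b : List (List Int)) :
    List Int → Bool × List (List Int)
  | [] => (false, b)
  | v :: vs =>
    if checkA (r, c) v b then
      let b1 := pvSet b r c v
      let res := solveCoreA fuel b1
      if res.1 then res
      else solveTryA fuel r c (pvSet res.2 r c 0) vs
    else solveTryA fuel r c b vs
  termination_by vs => (fuel, vs.length + 2)
def solveCoreA : Nat → List (List Int) → Bool × List (List Int)
  | 0, b => (false, b)
  | fuel + 1, b =>
    match findEmpty b with
    | none => (true, b)
    | some (r, c) => solveTryA fuel r c b (PySem.List.pyRange 1 10 1)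
  termination_by fuel _ => (fuel, 1)
end

def solve (board : List (List Int)) : Bool := (solveCoreA 82 board).1

-- ===== PORT B =====

-- empties = [(i, j) for i, row in enumerate(board) for j, x in enumerate(row) if x == 0]
def emptiesB (b : List (List Int)) : List (Int × Int) :=
  (PySem.List.enumerate b 0).flatMap (fun p =>
    (PySem.List.enumerate p.2 0).filterMap (fun q =>
      if q.2 == 0 then some (p.1, q.1) else none))

-- ok(r, c, num): row / column / box any()-comprehensions.
def checkB (r c num : Int) (b : List (List Int)) : Bool :=
  !((PySem.List.pyRange 0 9 1).any fun i => i != c && pvCell b r i == num) &&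
  (!((PySem.List.pyRange 0 9 1).any fun i => i != r && pvCell b i c == num) &&
   (let a := r - PySem.Int.mod r 3
    let bb := c - PySem.Int.mod c 3
    !((PySem.List.pyRange a (a + 3) 1).any fun i =>
        (PySem.List.pyRange bb (bb + 3) 1).any fun j =>
          ((i, j) != (r, c)) && pvCell b i j == num)))

-- go(k): recursion over the suffix empties[k:]; board threaded (mutated in place).
mutual
def goTryB (r c : Int) (b : List (List Int)) (rest : List (Int × Int)) :
    List Int → Bool × List (List Int)
  | [] => (false, b)
  | v :: vs =>
    if checkB r c v b then
      let b1 := pvSet b r c v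
      let res := goB rest b1
      if res.1 then res
      else goTryB r c (pvSet res.2 r c 0) rest vs
    else goTryB r c b rest vs
  termination_by vs => (rest.length, vs.length + 2)
def goB : List (Int × Int) → List (List Int) → Bool × List (List Int)
  | [], b => (true, b)
  | (r, c) :: ps, b => goTryB r c b ps (PySem.List.pyRange 1 10 1)
  termination_by ps _ => (ps.length, 1)
end

def solve_alt (board : List (List Int)) : Bool := (goB (emptiesB board) board).1

-- ===== PRECONDITION & SPEC =====
-- Pre_solve admits 9×9 boards (the Sudoku domain) and boards without any 0 cell
-- (both solvers report True without searching).  It excludes other shapes that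
-- contain a 0: there A raises IndexError for almost all of them (an empty cell
-- drives check/findEmpty off the board), and on the rest (a 0 lying beyond the
-- len(board[0])-column window A scans) A's True is an artefact of its window
-- while B's full-row scan raises.
def Pre_solve (board : List (List Int)) : Prop :=
  (board.length = 9 ∧ ∀ row ∈ board, row.length = 9) ∨
  (∀ row ∈ board, (board.headD []).length ≤ row.length ∧ (0 : Int) ∉ row)

instance (board : List (List Int)) : Decidable (Pre_solve board) := by
  unfold Pre_solve; infer_instance

def pvWitness_solve : List (List Int) :=
  [[5, 3, 0, 0, 7, 0, 0, 0, 0], [6, 0, 0, 1, 9, 5, 0, 0, 0], [0, 9, 8, 0, 0, 0, 0, 6, 0],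
   [8, 0, 0, 0, 6, 0, 0, 0, 3], [4, 0, 0, 8, 0, 3, 0, 0, 1], [7, 0, 0, 0, 2, 0, 0, 0, 6],
   [0, 6, 0, 0, 0, 0, 2, 8, 0], [0, 0, 0, 4, 1, 9, 0, 0, 5], [0, 0, 0, 0, 8, 0, 0, 7, 9]]

def Spec_solve (board : List (List Int)) (out : Bool) : Prop := out = solve_alt board
instance (board : List (List Int)) (out : Bool) : Decidable (Spec_solve board out) := by
  unfold Spec_solve; infer_instance

-- ===== CLAIM (what is proved, stated in full; the proofs are below) =====
def Claim_equal_solve : Prop :=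
  ∀ (board : List (List Int)), Dom_solve board → Pre_solve board →
    Spec_solve board (solve board)

-- ===== LEMMAS AND PROOFS =====

-- the 9×9 disjunct of Pre_solve
def Pre9 (b : List (List Int)) : Prop :=
  b.length = 9 ∧ ∀ row ∈ b, row.length = 9

-- B's empty-cell list in index form (proof-side view of emptiesB)
def pvEmpties (b : List (List Int)) : List (Int × Int) :=
  (PySem.List.pyRange 0 9 1).flatMap (fun i =>
    (PySem.List.pyRange 0 9 1).filterMap (fun j =>
      if pvCell b i j == 0 then some (i, j) else none))

theorem pv_len_first (b : List (List Int)) (hpre : Pre9 b) :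
    PySem.List.len (PySem.List.pyGetD b 0 []) = 9 := by
  obtain ⟨h1, h2⟩ := hpre
  match b, h1 with
  | x :: xs, h1 =>
    rw [PySem.List.pyGetD_zero_cons, PySem.List.len_eq, h2 x (by simp)]
    rfl

theorem pv_cellD (b : List (List Int)) (i j : Int) (hi0 : 0 ≤ i) (hj0 : 0 ≤ j) :
    pvCell b i j = (b.getD i.toNat []).getD j.toNat 0 := by
  unfold pvCell
  rw [show i = ((i.toNat : Nat) : Int) by omega, show j = ((j.toNat : Nat) : Int) by omega,
    PySem.List.pyGetD_natCast, PySem.List.pyGetD_natCast]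
  have h1 : max i 0 = i := by omega
  have h2 : max j 0 = j := by omega
  simp [h1, h2, List.getD]

theorem pv_setD (b : List (List Int)) (r c v : Int) (hr0 : 0 ≤ r) (hc0 : 0 ≤ c) :
    pvSet b r c v = b.set r.toNat ((b.getD r.toNat []).set c.toNat v) := by
  unfold pvSet
  rw [show r = ((r.toNat : Nat) : Int) by omega,
    PySem.List.pyGetD_natCast, PySem.List.pySetD_of_nonneg _ _ hc0,
    PySem.List.pySetD_natCast]
  have hm : max r 0 = r := by omega
  simp [hm]

theorem pv_row_len (b : List (List Int)) (hpre : Pre9 b) (n : Nat) (hn : n < 9) :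
    (b.getD n []).length = 9 := by
  obtain ⟨h1, h2⟩ := hpre
  have hlt : n < b.length := by omega
  rw [List.getD_eq_getElem b [] hlt]
  exact h2 _ (List.getElem_mem hlt)

theorem pv_pre_set (b : List (List Int)) (r c v : Int) (hpre : Pre9 b)
    (hr0 : 0 ≤ r) (hr9 : r < 9) (hc0 : 0 ≤ c) (hc9 : c < 9) :
    Pre9 (pvSet b r c v) := by
  rw [pv_setD b r c v hr0 hc0]
  refine ⟨by simpa using hpre.1, ?_⟩
  intro row hrow
  rcases List.mem_or_eq_of_mem_set hrow with h | h
  · exact hpre.2 row h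
  · rw [h, List.length_set]
    exact pv_row_len b hpre r.toNat (by omega)

theorem pv_getD_set_self (l : List Int) (n : Nat) (v : Int) (h : n < l.length) :
    (l.set n v).getD n 0 = v := by
  rw [List.getD_eq_getElem _ 0 (by simpa using h)]
  exact List.getElem_set_self (by simpa using h)

theorem pv_cell_set (b : List (List Int)) (r c i j v : Int) (hpre : Pre9 b)
    (hr0 : 0 ≤ r) (hr9 : r < 9) (hc0 : 0 ≤ c) (hc9 : c < 9)
    (hi0 : 0 ≤ i) (hi9 : i < 9) (hj0 : 0 ≤ j) (hj9 : j < 9) :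
    pvCell (pvSet b r c v) i j = if i = r ∧ j = c then v else pvCell b i j := by
  have hb9 : b.length = 9 := hpre.1
  have hrb : r.toNat < b.length := by omega
  have hrow : (b.getD r.toNat []).length = 9 := pv_row_len b hpre r.toNat (by omega)
  rw [pv_setD b r c v hr0 hc0, pv_cellD _ i j hi0 hj0, pv_cellD b i j hi0 hj0]
  by_cases hir : i = r
  · subst hir
    have hg : (b.set i.toNat ((b.getD i.toNat []).set c.toNat v)).getD i.toNat [] =
        (b.getD i.toNat []).set c.toNat v := by
      rw [List.getD_eq_getElem _ [] (by simpa using hrb)]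
      exact List.getElem_set_self (by simpa using hrb)
    rw [hg]
    by_cases hjc : j = c
    · subst hjc
      rw [if_pos ⟨rfl, rfl⟩]
      exact pv_getD_set_self _ _ _ (by omega)
    · rw [if_neg (by tauto)]
      have hne : ¬ c.toNat = j.toNat := by omega
      simp [List.getD, hne]
  · rw [if_neg (by tauto)]
    have hne : ¬ r.toNat = i.toNat := by omega
    have hg : (b.set r.toNat ((b.getD r.toNat []).set c.toNat v)).getD i.toNat [] =
        b.getD i.toNat [] := by
      simp [List.getD, hne]
    rw [hg]

theorem pv_set_cancel (b : List (List Int)) (r c v : Int) (hpre : Pre9 b)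
    (hr0 : 0 ≤ r) (hr9 : r < 9) (hc0 : 0 ≤ c) (hc9 : c < 9)
    (h0 : pvCell b r c = 0) :
    pvSet (pvSet b r c v) r c 0 = b := by
  have hb9 : b.length = 9 := hpre.1
  have hrb : r.toNat < b.length := by omega
  have hrow : (b.getD r.toNat []).length = 9 := pv_row_len b hpre r.toNat (by omega)
  rw [pv_cellD b r c hr0 hc0] at h0
  rw [pv_setD b r c v hr0 hc0, pv_setD _ r c 0 hr0 hc0]
  have hg : ((b.set r.toNat ((b.getD r.toNat []).set c.toNat v)).getD r.toNat []) =
      (b.getD r.toNat []).set c.toNat v := by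
    rw [List.getD_eq_getElem _ [] (by simpa using hrb)]
    exact List.getElem_set_self (by simpa using hrb)
  rw [hg, List.set_set, List.set_set]
  have hcb : c.toNat < (b.getD r.toNat []).length := by omega
  rw [List.getD_eq_getElem _ 0 hcb] at h0
  have h2 : (b.getD r.toNat []).set c.toNat 0 = b.getD r.toNat [] := by
    rw [← h0]; exact List.set_getElem_self hcb
  rw [h2, List.getD_eq_getElem b [] hrb, List.set_getElem_self hrb]

theorem pv_mem_empties (b : List (List Int)) (p : Int × Int) (hp : p ∈ pvEmpties b) :
    0 ≤ p.1 ∧ p.1 < 9 ∧ 0 ≤ p.2 ∧ p.2 < 9 ∧ pvCell b p.1 p.2 = 0 := by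
  unfold pvEmpties at hp
  simp only [List.mem_flatMap, List.mem_filterMap, PySem.List.mem_pyRange_one] at hp
  obtain ⟨i, hi, j, hj, hij⟩ := hp
  by_cases h : pvCell b i j == 0
  · rw [if_pos h] at hij
    cases hij
    simp only [beq_iff_eq] at h
    exact ⟨hi.1, hi.2, hj.1, hj.2, h⟩
  · rw [if_neg h] at hij; cases hij

theorem pv_cons_of_append {α : Type} (A Y : List α) (a : α) (ps : List α)
    (h : A ++ a :: Y = a :: ps) (hA : a ∉ A) : A = [] ∧ ps = Y := by
  cases A with
  | nil => exact ⟨rfl, by simpa using h.symm⟩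
  | cons x A =>
    simp only [List.cons_append, List.cons.injEq] at h
    exact absurd (by simp [h.1]) hA

theorem pv_row_filter_congr (b b' : List (List Int)) (i : Int) (js : List Int)
    (h : ∀ j ∈ js, pvCell b' i j = pvCell b i j) :
    (js.filterMap (fun j => if pvCell b' i j == 0 then some (i, j) else none)) =
    (js.filterMap (fun j => if pvCell b i j == 0 then some (i, j) else none)) := by
  induction js with
  | nil => rfl
  | cons j js ih =>
    simp only [List.filterMap_cons, h j (by simp)]
    rw [ih (fun j hj => h j (by simp [hj]))]

theorem pv_mem_filterMap_row (b : List (List Int)) (i : Int) (js : List Int)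
    (p : Int × Int)
    (hp : p ∈ js.filterMap (fun j => if pvCell b i j == 0 then some (i, j) else none)) :
    p.1 = i ∧ p.2 ∈ js := by
  simp only [List.mem_filterMap] at hp
  obtain ⟨j, hj, hij⟩ := hp
  by_cases h : pvCell b i j == 0
  · rw [if_pos h] at hij; cases hij; exact ⟨rfl, hj⟩
  · rw [if_neg h] at hij; cases hij

def pvRowF (b : List (List Int)) (i : Int) : List (Int × Int) :=
  (PySem.List.pyRange 0 9 1).filterMap (fun j => if pvCell b i j == 0 then some (i, j) else none)

theorem pv_empties_flat (b : List (List Int)) :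
    pvEmpties b = (PySem.List.pyRange 0 9 1).flatMap (pvRowF b) := rfl

theorem pv_rowF_congr (b b' : List (List Int)) (i : Int)
    (h : ∀ j, 0 ≤ j → j < 9 → pvCell b' i j = pvCell b i j) :
    pvRowF b' i = pvRowF b i := by
  unfold pvRowF
  apply pv_row_filter_congr
  intro j hj
  rw [PySem.List.mem_pyRange_one] at hj
  exact h j hj.1 hj.2

theorem pv_mem_rowF (b : List (List Int)) (i : Int) (p : Int × Int)
    (hp : p ∈ pvRowF b i) : p.1 = i := by
  exact (pv_mem_filterMap_row b i _ p hp).1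

theorem pv_empties_set (b : List (List Int)) (r c v : Int) (ps : List (Int × Int))
    (hpre : Pre9 b) (h : pvEmpties b = (r, c) :: ps) (hv : v ≠ 0) :
    pvEmpties (pvSet b r c v) = ps := by
  have hmem : (r, c) ∈ pvEmpties b := by rw [h]; simp
  obtain ⟨hr0, hr9, hc0, hc9, hcell⟩ := pv_mem_empties b (r, c) hmem
  simp only at hr0 hr9 hc0 hc9 hcell
  have hcs : ∀ i j, 0 ≤ i → i < 9 → 0 ≤ j → j < 9 →
      pvCell (pvSet b r c v) i j = if i = r ∧ j = c then v else pvCell b i j :=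
    fun i j a b' c' d => pv_cell_set b r c i j v hpre hr0 hr9 hc0 hc9 a b' c' d
  have hcolsplit : PySem.List.pyRange 0 9 1 =
      PySem.List.pyRange 0 c 1 ++ c :: PySem.List.pyRange (c + 1) 9 1 := by
    rw [PySem.List.pyRange_one_append 0 c 9 (by omega) (by omega)]
    have : PySem.List.pyRange c 9 1 = c :: PySem.List.pyRange (c + 1) 9 1 :=
      PySem.List.pyRange_one_cons (by omega)
    rw [this]
  have hrowsplit : PySem.List.pyRange 0 9 1 =
      PySem.List.pyRange 0 r 1 ++ r :: PySem.List.pyRange (r + 1) 9 1 := by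
    rw [PySem.List.pyRange_one_append 0 r 9 (by omega) (by omega)]
    have : PySem.List.pyRange r 9 1 = r :: PySem.List.pyRange (r + 1) 9 1 :=
      PySem.List.pyRange_one_cons (by omega)
    rw [this]
  set g : Int → Option (Int × Int) :=
    fun j => if pvCell b r j == 0 then some (r, j) else none with hg
  set X := (PySem.List.pyRange 0 c 1).filterMap g with hX
  set Y := (PySem.List.pyRange (c + 1) 9 1).filterMap g with hY
  set A1 := (PySem.List.pyRange 0 r 1).flatMap (pvRowF b) with hA1
  set A2 := (PySem.List.pyRange (r + 1) 9 1).flatMap (pvRowF b) with hA2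
  have hA1' : (PySem.List.pyRange 0 r 1).flatMap (pvRowF (pvSet b r c v)) = A1 :=
    List.flatMap_congr (fun i hi => by
      rw [PySem.List.mem_pyRange_one] at hi
      exact pv_rowF_congr b _ i (fun j h0 h9 => by
        rw [hcs i j hi.1 (by omega) h0 h9, if_neg (by omega)]))
  have hA2' : (PySem.List.pyRange (r + 1) 9 1).flatMap (pvRowF (pvSet b r c v)) = A2 :=
    List.flatMap_congr (fun i hi => by
      rw [PySem.List.mem_pyRange_one] at hi
      exact pv_rowF_congr b _ i (fun j h0 h9 => by
        rw [hcs i j (by omega) hi.2 h0 h9, if_neg (by omega)]))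
  have hcongr1 : ∀ (js : List Int), (∀ j ∈ js, 0 ≤ j ∧ j < 9 ∧ j ≠ c) →
      js.filterMap (fun j => if pvCell (pvSet b r c v) r j == 0 then some (r, j) else none) =
      js.filterMap g := by
    intro js hjs
    apply pv_row_filter_congr
    intro j hj
    obtain ⟨h0, h9, hne⟩ := hjs j hj
    rw [hcs r j hr0 hr9 h0 h9, if_neg (by tauto)]
  have hrowr' : pvRowF (pvSet b r c v) r = X ++ Y := by
    unfold pvRowF
    conv_lhs => rw [hcolsplit]
    rw [List.filterMap_append, List.filterMap_cons]
    rw [hcongr1 _ (fun j hj => by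
        rw [PySem.List.mem_pyRange_one] at hj; exact ⟨hj.1, by omega, by omega⟩),
      hcongr1 _ (fun j hj => by
        rw [PySem.List.mem_pyRange_one] at hj; exact ⟨by omega, hj.2, by omega⟩)]
    have hvc : pvCell (pvSet b r c v) r c = v := by
      rw [hcs r c hr0 hr9 hc0 hc9]; simp
    rw [hX, hY]
    simp [hvc, hv]
  have hrowrb : pvRowF b r = X ++ (r, c) :: Y := by
    unfold pvRowF
    conv_lhs => rw [hcolsplit]
    rw [List.filterMap_append, List.filterMap_cons]
    rw [hX, hY, hg]
    simp [hcell]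
  rw [pv_empties_flat] at h ⊢
  conv_lhs => rw [hrowsplit]
  rw [List.flatMap_append, List.flatMap_cons, hA1', hA2', hrowr']
  rw [hrowsplit, List.flatMap_append, List.flatMap_cons, ← hA1, ← hA2, hrowrb] at h
  have h' : (A1 ++ X) ++ (r, c) :: (Y ++ A2) = (r, c) :: ps := by
    rw [← h]; simp
  have hnotin : (r, c) ∉ A1 ++ X := by
    intro hin
    rcases List.mem_append.mp hin with hin | hin
    · rw [hA1, List.mem_flatMap] at hin
      obtain ⟨i, hi, hpi⟩ := hin
      rw [PySem.List.mem_pyRange_one] at hi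
      have := pv_mem_rowF b i _ hpi
      simp at this
      omega
    · rw [hX, List.mem_filterMap] at hin
      obtain ⟨j, hj, hgj⟩ := hin
      rw [PySem.List.mem_pyRange_one] at hj
      simp only [hg] at hgj
      split_ifs at hgj
      cases hgj
      omega
  obtain ⟨hpre0, hps⟩ := pv_cons_of_append (A1 ++ X) (Y ++ A2) (r, c) ps h' hnotin
  rw [List.append_eq_nil_iff] at hpre0
  rw [hps, hpre0.1, hpre0.2]
  simp

theorem pv_R9 : PySem.List.pyRange 0 9 1 = [0, 1, 2, 3, 4, 5, 6, 7, 8] := by decide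

theorem pv_range3 (a : Int) : PySem.List.pyRange a (a + 3) 1 = [a, a + 1, a + 2] := by
  rw [PySem.List.pyRange_one_cons (by omega), PySem.List.pyRange_one_cons (by omega),
      PySem.List.pyRange_one_cons (by omega), PySem.List.pyRange_one_eq_nil (by omega)]
  have h2 : a + 1 + 1 = a + 2 := by ring
  rw [h2]

theorem pv_all_two (l : List Int) (p q : Int → Bool) :
    l.all (fun i => !(p i) && !(q i)) = (!l.any p && !l.any q) := by
  induction l with
  | nil => simp
  | cons a l ih =>
    simp only [List.all_cons, List.any_cons, ih, Bool.not_or]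
    cases p a <;> cases q a <;> simp

theorem pv_all_three (l : List Int) (p q s : Int → Bool) :
    l.all (fun i => !(p i) && (!(q i) && !(s i))) = (!l.any p && (!l.any q && !l.any s)) := by
  induction l with
  | nil => simp
  | cons a l ih =>
    simp only [List.all_cons, List.any_cons, ih, Bool.not_or]
    cases p a <;> cases q a <;> cases s a <;> simp

theorem pv_shape (P Q X Y Z : Bool) :
    ((!P && !Q) && (!X && (!Y && !Z))) = (!P && (!Q && !(X || (Y || Z)))) := by
  cases P <;> cases Q <;> cases X <;> cases Y <;> cases Z <;> rfl

theorem pv_check_eq (b : List (List Int)) (r c num : Int) (hpre : Pre9 b)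
    (hr0 : 0 ≤ r) (hr9 : r < 9) (hc0 : 0 ≤ c) (hc9 : c < 9) :
    checkA (r, c) num b = checkB r c num b := by
  unfold checkA checkB
  rw [pv_len_first b hpre]
  have e1 : r - PySem.Int.mod r 3 = PySem.Int.floordiv r 3 * 3 := by
    have := PySem.Int.floordiv_mul_add_mod r 3; omega
  have e2 : c - PySem.Int.mod c 3 = PySem.Int.floordiv c 3 * 3 := by
    have := PySem.Int.floordiv_mul_add_mod c 3; omega
  simp only [e1, e2]
  rw [pv_range3 (PySem.Int.floordiv r 3 * 3)]
  simp only [List.any_cons, List.any_nil, Bool.or_false]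
  rw [pv_all_two _ (fun i => pvCell b r i == num && c != i)
        (fun i => pvCell b i c == num && r != i),
      pv_all_three _
        (fun j => pvCell b (PySem.Int.floordiv r 3 * 3) j == num &&
          ((PySem.Int.floordiv r 3 * 3, j) != ((r : Int), c)))
        (fun j => pvCell b (PySem.Int.floordiv r 3 * 3 + 1) j == num &&
          ((PySem.Int.floordiv r 3 * 3 + 1, j) != ((r : Int), c)))
        (fun j => pvCell b (PySem.Int.floordiv r 3 * 3 + 2) j == num &&
          ((PySem.Int.floordiv r 3 * 3 + 2, j) != ((r : Int), c)))]
  have hbne : ∀ (x y : Int), (x != y) = (y != x) := fun x y => by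
    rw [Bool.eq_iff_iff]; simp; omega
  have hP : (PySem.List.pyRange 0 9 1).any (fun i => i != c && pvCell b r i == num)
      = (PySem.List.pyRange 0 9 1).any (fun i => pvCell b r i == num && c != i) :=
    PySem.List.any_congr_mem (fun i _ => by rw [Bool.and_comm, hbne c i])
  have hQ : (PySem.List.pyRange 0 9 1).any (fun i => i != r && pvCell b i c == num)
      = (PySem.List.pyRange 0 9 1).any (fun i => pvCell b i c == num && r != i) :=
    PySem.List.any_congr_mem (fun i _ => by rw [Bool.and_comm, hbne r i])
  have hbox : ∀ (a : Int),
      (PySem.List.pyRange (PySem.Int.floordiv c 3 * 3)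
        (PySem.Int.floordiv c 3 * 3 + 3) 1).any (fun j => ((a, j) != ((r : Int), c)) && pvCell b a j == num)
      = (PySem.List.pyRange (PySem.Int.floordiv c 3 * 3)
        (PySem.Int.floordiv c 3 * 3 + 3) 1).any (fun j => pvCell b a j == num && ((a, j) != ((r : Int), c))) :=
    fun a => PySem.List.any_congr_mem (fun j _ => Bool.and_comm _ _)
  rw [hP, hQ, hbox, hbox, hbox]
  exact pv_shape _ _ _ _ _

-- findEmpty's inner loop 'for j in range(len(board[0])): if board[i][j] == 0: return (i, j)'
theorem pv_len_empties (b : List (List Int)) : (pvEmpties b).length ≤ 81 := by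
  unfold pvEmpties
  rw [pv_R9]
  simp only [List.flatMap_cons, List.flatMap_nil, List.length_append, List.length_nil]
  have hle : ∀ (i : Int), (([0, 1, 2, 3, 4, 5, 6, 7, 8] : List Int).filterMap
      (fun j => if pvCell b i j == 0 then some (i, j) else none)).length ≤ 9 := by
    intro i
    simpa using List.length_filterMap_le
      (fun j => if pvCell b i j == 0 then some (i, j) else none) [0, 1, 2, 3, 4, 5, 6, 7, 8]
  have h0 := hle 0; have h1 := hle 1; have h2 := hle 2; have h3 := hle 3
  have h4 := hle 4; have h5 := hle 5; have h6 := hle 6; have h7 := hle 7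
  have h8 := hle 8
  omega

theorem pv_restore : ∀ (ps : List (Int × Int)) (b : List (List Int)), Pre9 b →
    pvEmpties b = ps → (goB ps b).1 = false → (goB ps b).2 = b := by
  intro ps
  induction ps with
  | nil => intro b _ _ hf; simp [goB] at hf
  | cons p ps ih =>
    obtain ⟨r, c⟩ := p
    intro b hpre hemp
    obtain ⟨hr0, hr9, hc0, hc9, hcell⟩ := pv_mem_empties b (r, c) (by rw [hemp]; simp)
    simp only at hr0 hr9 hc0 hc9 hcell
    rw [goB]
    have hvals : ∀ v ∈ PySem.List.pyRange 1 10 1, v ≠ 0 := by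
      intro v hv; rw [PySem.List.mem_pyRange_one] at hv; omega
    revert hvals
    generalize (PySem.List.pyRange 1 10 1) = vals
    intro hvals
    induction vals with
    | nil => intro hf; simp [goTryB]
    | cons v vs ihv =>
      intro hf
      rw [goTryB] at hf ⊢
      by_cases hchk : checkB r c v b
      · rw [if_pos hchk] at hf ⊢
        simp only at hf ⊢
        by_cases hres : (goB ps (pvSet b r c v)).1
        · rw [if_pos hres] at hf; rw [hres] at hf; cases hf
        · rw [if_neg hres] at hf ⊢
          simp only [Bool.not_eq_true] at hres
          have hbpre' := pv_pre_set b r c v hpre hr0 hr9 hc0 hc9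
          have hemp' : pvEmpties (pvSet b r c v) = ps :=
            pv_empties_set b r c v ps hpre hemp (hvals v (by simp))
          have hrestore := ih (pvSet b r c v) hbpre' hemp' hres
          rw [hrestore, pv_set_cancel b r c v hpre hr0 hr9 hc0 hc9 hcell] at hf ⊢
          exact ihv (fun w hw => hvals w (by simp [hw])) hf
      · rw [if_neg hchk] at hf ⊢
        exact ihv (fun w hw => hvals w (by simp [hw])) hf

theorem pv_inner_eq (b : List (List Int)) (i : Int) (js : List Int) :
    findEmptyInner b i js =
      (js.filterMap (fun j => if pvCell b i j == 0 then some (i, j) else none)).head? := by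
  induction js with
  | nil => rfl
  | cons j js ih =>
    simp only [findEmptyInner, List.filterMap_cons]
    by_cases h : pvCell b i j == 0 <;> simp [h, ih]

theorem pv_outer_eq (b : List (List Int)) (cols : List Int) (is : List Int) :
    findEmptyOuter b cols is =
      (is.flatMap (fun i =>
        cols.filterMap (fun j => if pvCell b i j == 0 then some (i, j) else none))).head? := by
  induction is with
  | nil => rfl
  | cons i is ih =>
    simp only [findEmptyOuter, List.flatMap_cons, List.head?_append, pv_inner_eq, ih]
    cases (cols.filterMap (fun j => if pvCell b i j == 0 then some (i, j) else none)).head? <;> simp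

theorem pv_findEmpty_eq (b : List (List Int)) (hpre : Pre9 b) :
    findEmpty b = (pvEmpties b).head? := by
  unfold findEmpty pvEmpties
  rw [pv_len_first b hpre, PySem.List.len_eq, hpre.1, pv_outer_eq]
  rfl


theorem pv_main_aux : ∀ (ps : List (Int × Int)) (b : List (List Int)) (fuel : Nat),
    Pre9 b → pvEmpties b = ps → ps.length < fuel →
    solveCoreA fuel b = goB ps b := by
  intro ps
  induction ps with
  | nil =>
    intro b fuel hpre hemp hlen
    match fuel, hlen with
    | f + 1, _ =>
      rw [solveCoreA, goB, pv_findEmpty_eq b hpre, hemp]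
      rfl
  | cons p ps ih =>
    obtain ⟨r, c⟩ := p
    intro b fuel hpre hemp hlen
    match fuel, hlen with
    | f + 1, hlen =>
      obtain ⟨hr0, hr9, hc0, hc9, hcell⟩ := pv_mem_empties b (r, c) (by rw [hemp]; simp)
      simp only at hr0 hr9 hc0 hc9 hcell
      rw [solveCoreA, goB, pv_findEmpty_eq b hpre, hemp]
      simp only [List.head?_cons]
      have hvals : ∀ v ∈ PySem.List.pyRange 1 10 1, v ≠ 0 := by
        intro v hv; rw [PySem.List.mem_pyRange_one] at hv; omega
      revert hvals
      generalize (PySem.List.pyRange 1 10 1) = vals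
      intro hvals
      induction vals with
      | nil => rw [solveTryA, goTryB]
      | cons v vs ihv =>
        rw [solveTryA, goTryB]
        rw [pv_check_eq b r c v hpre hr0 hr9 hc0 hc9]
        by_cases hchk : checkB r c v b
        · rw [if_pos hchk, if_pos hchk]
          simp only
          have hbpre' := pv_pre_set b r c v hpre hr0 hr9 hc0 hc9
          have hemp' : pvEmpties (pvSet b r c v) = ps :=
            pv_empties_set b r c v ps hpre hemp (hvals v (by simp))
          have hgo : solveCoreA f (pvSet b r c v) = goB ps (pvSet b r c v) :=
            ih (pvSet b r c v) f hbpre' hemp' (by simp at hlen; omega)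
          rw [hgo]
          by_cases hres : (goB ps (pvSet b r c v)).1
          · rw [if_pos hres, if_pos hres]
          · rw [if_neg hres, if_neg hres]
            simp only [Bool.not_eq_true] at hres
            have hrestore := pv_restore ps (pvSet b r c v) hbpre' hemp' hres
            rw [hrestore, pv_set_cancel b r c v hpre hr0 hr9 hc0 hc9 hcell]
            exact ihv (fun w hw => hvals w (by simp [hw]))
        · rw [if_neg hchk, if_neg hchk]
          exact ihv (fun w hw => hvals w (by simp [hw]))

theorem pv_main (b : List (List Int)) (hpre : Pre9 b) :
    solveCoreA 82 b = goB (pvEmpties b) b :=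
  pv_main_aux (pvEmpties b) b 82 hpre rfl (by have := pv_len_empties b; omega)


theorem pv_emptiesB_eq (b : List (List Int)) (hpre : Pre9 b) :
    emptiesB b = pvEmpties b := by
  unfold emptiesB pvEmpties
  rw [PySem.List.enumerate_eq_map_pyRange b ([] : List Int), PySem.List.len_eq, hpre.1]
  rw [List.flatMap_map]
  apply List.flatMap_congr
  intro i hi
  rw [PySem.List.mem_pyRange_one] at hi
  have hrl : PySem.List.len (PySem.List.pyGetD b i []) = 9 := by
    rw [show i = ((i.toNat : Nat) : Int) by omega, PySem.List.pyGetD_natCast,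
      PySem.List.len_eq, pv_row_len b hpre i.toNat (by omega)]
    rfl
  rw [PySem.List.enumerate_eq_map_pyRange _ (0 : Int), hrl, List.filterMap_map]
  rfl

theorem pv_emptiesB_nil (b : List (List Int)) (h : ∀ row ∈ b, (0 : Int) ∉ row) :
    emptiesB b = [] := by
  unfold emptiesB
  rw [List.flatMap_eq_nil_iff]
  intro p hp
  rw [PySem.List.mem_enumerate_iff] at hp
  obtain ⟨k, hk, rfl⟩ := hp
  rw [List.filterMap_eq_nil_iff]
  intro q hq
  rw [PySem.List.mem_enumerate_iff] at hq
  obtain ⟨m, hm, rfl⟩ := hq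
  simp only
  rw [if_neg]
  simp only [beq_iff_eq]
  intro h0
  exact h b[k] (List.getElem_mem hk) (by rw [← h0]; exact List.getElem_mem hm)

theorem pv_findEmpty_none (b : List (List Int))
    (h : ∀ row ∈ b, (b.headD []).length ≤ row.length ∧ (0 : Int) ∉ row) :
    findEmpty b = none := by
  unfold findEmpty
  rw [pv_outer_eq, List.head?_eq_none_iff, List.flatMap_eq_nil_iff]
  intro i hi
  rw [PySem.List.mem_pyRange_one, PySem.List.len_eq] at hi
  rw [List.filterMap_eq_nil_iff]
  intro j hj
  rw [PySem.List.mem_pyRange_one, PySem.List.len_eq] at hj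
  have hhead : PySem.List.pyGetD b 0 [] = b.headD [] := by
    cases b with
    | nil => rfl
    | cons x xs => rw [PySem.List.pyGetD_zero_cons]; rfl
  have hrowmem : PySem.List.pyGetD b i [] ∈ b :=
    PySem.List.pyGetD_mem b [] (by simp only [PySem.Raise.InRange]; omega)
  obtain ⟨hlen, hzero⟩ := h _ hrowmem
  rw [← hhead] at hlen
  have hcellmem : pvCell b i j ∈ PySem.List.pyGetD b i [] := by
    unfold pvCell
    exact PySem.List.pyGetD_mem _ 0 (by simp only [PySem.Raise.InRange]; omega)
  rw [if_neg]
  simp only [beq_iff_eq]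
  intro h0
  exact hzero (by rw [← h0]; exact hcellmem)

-- ===== VERDICT (by name: the statement is the Claim_ definition above) =====
theorem solve_spec : Claim_equal_solve := by
  intro board _ hpre
  unfold Spec_solve solve solve_alt
  cases hpre with
  | inl h9 =>
    rw [pv_main board h9, pv_emptiesB_eq board h9]
  | inr hz =>
    have hfe : findEmpty board = none := pv_findEmpty_none board hz
    have hemp : emptiesB board = [] := pv_emptiesB_nil board (fun row hr => (hz row hr).2)
    rw [hemp, show (82 : Nat) = 81 + 1 from rfl, solveCoreA, hfe, goB]
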